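-- pv_equiv track=rewrite | github.com/AgrimSharma/project_python | ScrumDo-Private/scrumdo_web/apps/projects/util.py | reduce_burndown_data
-- ===== SOURCE A (Python) =====
-- def reduce_burndown_data( data ):
--     """Takes a list of datapoints for a burnup chart and if there are more than 30, removes any redundant points.
--        Redundant is when a point's two neighbors are equal to itself so it would just be a marker on a straight line.
--        (I guess points along a straight sloped line could be considered redundant, but we don't remove those)
--        The middle 15 is considered redundant here: [5,6,10,10,15,15,15,20]
--        The middle 4 threes are considered redundant here: [1,2,3,3,3,3,3,3,5]
--     """
--     if len(data) < 30:
--         return data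
--
--     subset = data[1:-1] # Subset of data that never includes first/last
--     remove = []
--     for idx,item in enumerate( subset ):
--                 # idx = index before this item in data
--                 # idx+1 = this item in data
--                 # idx+2 = next item in data
--         last_val = data[ idx ][1]
--         next_val = data[ idx+2 ][1]
--
--         if item[1]==last_val and item[1]==next_val:
--             # don't need this item!
--             remove.append(idx+1)
--             # logger.debug("Can remove %d" % (idx+1))
--
--     remove.reverse()
--     for remove_index in remove:
--         del data[remove_index:(remove_index+1)]
--     return data
-- ===== SOURCE B (Python) =====
-- def reduce_burndown_data(data):
--     if len(data) < 30:
--         return data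
--     vals = [row[1] for row in data]
--     n = len(data)
--     out = [data[0]]
--     for i in range(1, n - 1):
--         if not (vals[i - 1] == vals[i] == vals[i + 1]):
--             out.append(data[i])
--     out.append(data[n - 1])
--     data[:] = out
--     return data
-- ===== Notes on version B (the rewrite author's own statement) =====
-- stated objective: alternative
-- what changed: A collects redundant indices and then deletes them one by one from the list with slice deletions; B does a single forward pass building a new list that keeps a point unless its value equals both original neighbors, then assigns it back in place.
import Mathlib
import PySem

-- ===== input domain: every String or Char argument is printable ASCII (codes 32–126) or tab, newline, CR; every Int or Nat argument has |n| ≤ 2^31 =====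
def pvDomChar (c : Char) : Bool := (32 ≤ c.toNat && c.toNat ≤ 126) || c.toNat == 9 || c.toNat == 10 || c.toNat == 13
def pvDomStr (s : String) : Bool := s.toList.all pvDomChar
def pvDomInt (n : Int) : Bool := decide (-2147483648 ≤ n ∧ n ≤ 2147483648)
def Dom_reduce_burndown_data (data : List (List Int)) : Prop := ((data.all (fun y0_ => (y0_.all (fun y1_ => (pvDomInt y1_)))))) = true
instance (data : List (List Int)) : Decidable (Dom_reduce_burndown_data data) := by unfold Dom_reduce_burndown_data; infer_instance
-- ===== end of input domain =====

-- B replaces A's collect-then-delete-in-place strategy by one forward pass that rebuilds the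
-- list, skipping points whose value equals both original neighbors; both Pythons mutate `data`
-- to the same final contents, and the theorems are about the returned value.

-- ===== PORT A =====
-- data[i][1] with defaults; in range for every access A makes on inputs admitted by Pre_.
def rbVal (data : List (List Int)) (i : Int) : Int :=
  PySem.List.pyGetD (PySem.List.pyGetD data i []) 1 0

-- del d[i:i+1]  (Python slice deletion: d[:i] + d[i+1:])
def rbDel (d : List (List Int)) (i : Int) : List (List Int) :=
  PySem.List.slice d none (some i) ++ PySem.List.slice d (some (i + 1)) none

def reduce_burndown_data (data : List (List Int)) : List (List Int) :=
  if data.length < 30 then data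
  else
    let subset := PySem.List.slice data (some 1) (some (-1))
    let remove : List Int :=
      (PySem.List.enumerate subset).foldl
        (fun acc p =>
          let idx := p.1
          let item := p.2
          let last_val := rbVal data idx
          let next_val := rbVal data (idx + 2)
          if PySem.List.pyGetD item 1 0 = last_val ∧ PySem.List.pyGetD item 1 0 = next_val then
            acc ++ [idx + 1]
          else acc) []
    (remove.reverse).foldl (fun d i => rbDel d i) data

-- ===== PORT B =====
def reduce_burndown_data_alt (data : List (List Int)) : List (List Int) :=
  if data.length < 30 then data
  else
    let vals := data.map (fun row => PySem.List.pyGetD row 1 0)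
    let n : Int := data.length
    let out := [PySem.List.pyGetD data 0 []]
    let out := (PySem.List.pyRange 1 (n - 1) 1).foldl
      (fun acc i =>
        if ¬ (PySem.List.pyGetD vals (i - 1) 0 = PySem.List.pyGetD vals i 0 ∧
              PySem.List.pyGetD vals i 0 = PySem.List.pyGetD vals (i + 1) 0) then
          acc ++ [PySem.List.pyGetD data i []]
        else acc) out
    out ++ [PySem.List.pyGetD data (n - 1) []]

-- ===== PRECONDITION & SPEC =====
-- A indexes row[1] of every row when len(data) >= 30; Pre_ excludes exactly the inputs where
-- that raises IndexError (some row shorter than 2 while len(data) >= 30).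
def Pre_reduce_burndown_data (data : List (List Int)) : Prop :=
  data.length < 30 ∨ ∀ row ∈ data, 2 ≤ row.length
instance (data : List (List Int)) : Decidable (Pre_reduce_burndown_data data) := by
  unfold Pre_reduce_burndown_data; infer_instance

def pvWitness_reduce_burndown_data : List (List Int) := [[0, 1], [0, 2]]

def Spec_reduce_burndown_data (data : List (List Int)) (out : List (List Int)) : Prop := out = reduce_burndown_data_alt data
instance (data : List (List Int)) (out : List (List Int)) : Decidable (Spec_reduce_burndown_data data out) := by unfold Spec_reduce_burndown_data; infer_instance

-- ===== CLAIM (what is proved, stated in full; the proofs are below) =====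
def Claim_equal_reduce_burndown_data : Prop := ∀ (data : List (List Int)), Dom_reduce_burndown_data data → Pre_reduce_burndown_data data → Spec_reduce_burndown_data data (reduce_burndown_data data)

-- ===== LEMMAS AND PROOFS =====

-- delete the element at Nat index m (what rbDel does on a nonnegative index)
def rbDelNat (d : List (List Int)) (m : Nat) : List (List Int) :=
  d.take m ++ d.drop (m + 1)

-- A's redundancy test at middle position k+1 (value reads with Python defaults)
def rbQb (data : List (List Int)) (k : Nat) : Bool :=
  decide (rbVal data ((k : Int) + 1) = rbVal data (k : Int) ∧
          rbVal data ((k : Int) + 1) = rbVal data ((k : Int) + 2))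

-- the common result both ports compute when data.length ≥ 30
def rbKeep (data : List (List Int)) : List (List Int) :=
  data.getD 0 [] ::
    (((List.range (data.length - 2)).filter (fun k => !rbQb data k)).map
      (fun k => data.getD (k + 1) [])) ++ [data.getD (data.length - 1) []]

theorem rb_map_getD_range {α : Type} (xs : List α) (d : α) :
    (List.range xs.length).map (fun i => xs.getD i d) = xs := by
  apply List.ext_getElem
  · simp
  · intro i h1 h2
    simp [List.getD_eq_getElem?_getD, h2]

theorem rbDelNat_length (xs : List (List Int)) (j : Nat) (h : j < xs.length) :
    (rbDelNat xs j).length = xs.length - 1 := by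
  simp [rbDelNat]; omega

theorem rbDelNat_getD_lt (xs : List (List Int)) (j i : Nat) (hij : i < j)
    (hj : j ≤ xs.length) : (rbDelNat xs j).getD i [] = xs.getD i [] := by
  simp [rbDelNat, List.getD_eq_getElem?_getD, List.getElem?_append,
    hij, lt_of_lt_of_le hij hj]

theorem rbDelNat_getD_ge (xs : List (List Int)) (j i : Nat) (hij : j ≤ i)
    (hj : j ≤ xs.length) : (rbDelNat xs j).getD i [] = xs.getD (i + 1) [] := by
  have hlen : (xs.take j).length = j := by rw [List.length_take]; omega
  rw [rbDelNat, List.getD_eq_getElem?_getD, List.getD_eq_getElem?_getD,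
    List.getElem?_append, hlen, if_neg (Nat.not_lt.mpr hij), List.getElem?_drop]
  congr 2
  omega

-- deleting a strictly decreasing list of in-range indices = keeping the complement
theorem rb_foldl_del (rs : List Nat) : ∀ (xs : List (List Int)),
    rs.Pairwise (· > ·) → (∀ r ∈ rs, r < xs.length) →
    rs.foldl rbDelNat xs =
      ((List.range xs.length).filter (fun i => !rs.contains i)).map
        (fun i => xs.getD i []) := by
  induction rs with
  | nil =>
      intro xs _ _
      rw [List.foldl_nil, List.filter_eq_self.mpr (by intro a _; simp),
        rb_map_getD_range]
  | cons j rest ih =>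
      intro xs hpw hb
      have hrest : ∀ r ∈ rest, r < j := by
        intro r hr; exact (List.pairwise_cons.mp hpw).1 r hr
      have hj : j < xs.length := hb j (by simp)
      have hlen : (rbDelNat xs j).length = xs.length - 1 := rbDelNat_length xs j hj
      have step := ih (rbDelNat xs j) (List.pairwise_cons.mp hpw).2
        (by intro r hr; rw [hlen]; have := hrest r hr; omega)
      rw [List.foldl_cons, step]
      rw [hlen]
      obtain ⟨m, hm⟩ : ∃ m, xs.length = j + 1 + m := ⟨xs.length - j - 1, by omega⟩
      rw [show xs.length - 1 = j + m from by omega,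
        show xs.length = j + (m + 1) from by omega,
        List.range_add, List.range_add]
      rw [List.filter_append, List.filter_append, List.map_append, List.map_append]
      congr 1
      · -- indices below j
        have hpq : ∀ i ∈ List.range j, (!(rest.contains i)) = (!((j :: rest).contains i)) := by
          intro i hi
          have hij : i < j := List.mem_range.mp hi
          simp [Nat.ne_of_lt hij]
        rw [List.filter_congr hpq]
        apply List.map_congr_left
        intro i hi
        have hij : i < j := List.mem_range.mp (List.mem_of_mem_filter hi)
        exact rbDelNat_getD_lt xs j i hij (le_of_lt hj)
      · -- indices ≥ j
        have hL : List.filter (fun i => !rest.contains i)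
            (List.map (fun x => j + x) (List.range m))
            = List.map (fun x => j + x) (List.range m) := by
          rw [List.filter_eq_self]
          intro a ha
          obtain ⟨t, ht, rfl⟩ := List.mem_map.mp ha
          simp only [Bool.not_eq_true', Bool.eq_false_iff, ne_eq]
          intro hc
          have := hrest _ (List.contains_iff_mem.mp hc); omega
        have hR : List.filter (fun i => !(j :: rest).contains i)
            (List.map (fun x => j + x) (List.range (m + 1)))
            = List.map (fun t => j + t + 1) (List.range m) := by
          rw [List.range_succ_eq_map, List.map_cons, List.filter_cons, List.map_map]
          have hj0 : (!(j :: rest).contains (j + 0)) = false := by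
            simp
          rw [hj0]
          have hkeep : ∀ a ∈ List.map ((fun x => j + x) ∘ Nat.succ)
              (List.range m), (!(j :: rest).contains a) = true := by
            intro a ha
            obtain ⟨t, ht, rfl⟩ := List.mem_map.mp ha
            simp only [Function.comp, Bool.not_eq_true', Bool.eq_false_iff, ne_eq]
            intro hc
            rcases List.mem_cons.mp (List.contains_iff_mem.mp hc) with h | h
            · omega
            · have := hrest _ h; omega
          rw [List.filter_eq_self.mpr hkeep]
          simp only [Bool.false_eq_true, if_false]
          apply List.map_congr_left
          intro t _
          simp only [Function.comp]
          omega
        rw [hL, hR, List.map_map, List.map_map]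
        apply List.map_congr_left
        intro t _
        simp only [Function.comp]
        exact rbDelNat_getD_ge xs j (j + t) (by omega) (le_of_lt hj)

-- enumerate as a map over range
theorem rb_enumerate_eq (xs : List (List Int)) : ∀ (s : Int),
    PySem.List.enumerate xs s
      = (List.range xs.length).map (fun k : Nat => (s + (k : Int), xs.getD k [])) := by
  induction xs with
  | nil => intro s; simp [PySem.List.enumerate]
  | cons x xs ih =>
      intro s
      rw [PySem.List.enumerate_cons, ih (s + 1)]
      simp only [List.length_cons, List.range_succ_eq_map, List.map_cons, List.map_map]
      congr 1
      · simp
      · apply List.map_congr_left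
        intro k _
        simp only [Function.comp, List.getD_cons_succ, Prod.mk.injEq]
        refine ⟨by push_cast; ring, trivial⟩
theorem rb_vals_getD (data : List (List Int)) (m : Nat) :
    PySem.List.pyGetD (data.map (fun row => PySem.List.pyGetD row 1 0)) (m : Int) 0
      = rbVal data (m : Int) := by
  rw [PySem.List.pyGetD_natCast]
  rw [rbVal, PySem.List.pyGetD_natCast]
  by_cases hm : m < data.length
  · rw [List.getD_eq_getElem?_getD, List.getElem?_map, List.getElem?_eq_getElem hm,
      List.getD_eq_getElem?_getD, List.getElem?_eq_getElem hm]
    rfl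
  · rw [List.getD_eq_getElem?_getD, List.getElem?_map,
      List.getElem?_eq_none (by omega), List.getD_eq_getElem?_getD,
      List.getElem?_eq_none (by omega)]
    rfl

theorem rb_alt_eq (data : List (List Int)) (h : 30 ≤ data.length) :
    reduce_burndown_data_alt data = rbKeep data := by
  unfold reduce_burndown_data_alt
  rw [if_neg (by omega)]
  simp only []
  rw [PySem.List.pyRange_one]
  rw [show (((data.length : Int) - 1) - 1).toNat = data.length - 2 from by omega]
  rw [List.foldl_map]
  have hbody : (fun (acc : List (List Int)) (k : Nat) =>
      if ¬ (PySem.List.pyGetD (data.map (fun row => PySem.List.pyGetD row 1 0)) (1 + (k : Int) - 1) 0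
              = PySem.List.pyGetD (data.map (fun row => PySem.List.pyGetD row 1 0)) (1 + (k : Int)) 0 ∧
            PySem.List.pyGetD (data.map (fun row => PySem.List.pyGetD row 1 0)) (1 + (k : Int)) 0
              = PySem.List.pyGetD (data.map (fun row => PySem.List.pyGetD row 1 0)) (1 + (k : Int) + 1) 0) then
        acc ++ [PySem.List.pyGetD data (1 + (k : Int)) []]
      else acc)
      = (fun acc k => if (!rbQb data k) = true then acc ++ [data.getD (k + 1) []] else acc) := by
    funext acc k
    rw [show (1 : Int) + (k : Int) + 1 = (((k + 2 : Nat) : Int)) from by push_cast; ring,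
      show (1 : Int) + (k : Int) - 1 = ((k : Nat) : Int) from by ring,
      show (1 : Int) + (k : Int) = (((k + 1 : Nat) : Int)) from by push_cast; ring]
    rw [rb_vals_getD data k, rb_vals_getD data (k + 1), rb_vals_getD data (k + 2),
      PySem.List.pyGetD_natCast]
    have hiff : (rbVal data ((k : Nat) : Int) = rbVal data (((k + 1 : Nat) : Int)) ∧
        rbVal data (((k + 1 : Nat) : Int)) = rbVal data (((k + 2 : Nat) : Int)))
        ↔ rbQb data k = true := by
      simp only [rbQb, decide_eq_true_eq]
      constructor
      · rintro ⟨h1, h2⟩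
        constructor
        · rw [show ((k : Int) + 1) = (((k + 1 : Nat) : Int)) from by push_cast; ring]
          exact h1.symm
        · rw [show ((k : Int) + 1) = (((k + 1 : Nat) : Int)) from by push_cast; ring,
            show ((k : Int) + 2) = (((k + 2 : Nat) : Int)) from by push_cast; ring]
          exact h2
      · rintro ⟨h1, h2⟩
        rw [show ((k : Int) + 1) = (((k + 1 : Nat) : Int)) from by push_cast; ring] at h1 h2
        rw [show ((k : Int) + 2) = (((k + 2 : Nat) : Int)) from by push_cast; ring] at h2
        exact ⟨h1.symm, h2⟩
    exact if_congr (by rw [hiff]; simp) rfl rfl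
  rw [hbody]
  rw [PySem.List.foldl_append_if (fun k => !rbQb data k) (fun k => data.getD (k + 1) [])
    (List.range (data.length - 2)) [PySem.List.pyGetD data 0 []]]
  rw [show (0 : Int) = ((0 : Nat) : Int) from rfl, PySem.List.pyGetD_natCast,
    show ((data.length : Int) - 1) = (((data.length - 1 : Nat) : Int)) from by omega,
    PySem.List.pyGetD_natCast]
  rw [rbKeep]
  simp

theorem rb_del_eq (d : List (List Int)) (k : Nat) :
    rbDel d ((k : Int) + 1) = rbDelNat d (k + 1) := by
  rw [rbDel, PySem.List.slice_to d (by omega : (0:Int) ≤ (k : Int) + 1),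
    PySem.List.slice_from d (by omega : (0:Int) ≤ (k : Int) + 1 + 1), rbDelNat]
  rw [show ((k : Int) + 1).toNat = k + 1 from by omega,
    show ((k : Int) + 1 + 1).toNat = k + 1 + 1 from by omega]

theorem rb_a_eq (data : List (List Int)) (h : 30 ≤ data.length) :
    reduce_burndown_data data = rbKeep data := by
  unfold reduce_burndown_data
  rw [if_neg (by omega)]
  simp only []
  have c1 : PySem.List.clampIdx data.length 1 = 1 := by
    rw [PySem.List.clampIdx]
    rw [if_neg (by norm_num)]
    simp
    omega
  have c2 : PySem.List.clampIdx data.length (-1) = data.length - 1 := by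
    rw [PySem.List.clampIdx]
    rw [if_pos (by norm_num), if_neg (by omega)]
    omega
  have e12 : data.length - 1 - 1 = data.length - 2 := by omega
  have hsub : PySem.List.slice data (some 1) (some (-1))
      = (data.drop 1).take (data.length - 2) := by
    simp only [PySem.List.slice, c1, c2, e12]
  have hsublen : ((data.drop 1).take (data.length - 2)).length = data.length - 2 := by
    simp
    omega
  have hsubget : ∀ k, k < data.length - 2 →
      ((data.drop 1).take (data.length - 2)).getD k [] = data.getD (k + 1) [] := by
    intro k hk
    rw [List.getD_eq_getElem?_getD, List.getElem?_take, if_pos hk, List.getElem?_drop,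
      List.getD_eq_getElem?_getD]
    congr 2
    omega
  rw [hsub, rb_enumerate_eq _ 0, List.foldl_map, hsublen]
  rw [PySem.List.foldl_congr_mem (List.range (data.length - 2)) _
    (fun acc k => if rbQb data k = true then acc ++ [(k : Int) + 1] else acc) []
    (by
      intro acc k hk
      have hk2 : k < data.length - 2 := List.mem_range.mp hk
      simp only []
      rw [hsubget k hk2]
      rw [show (0 : Int) + (k : Int) = (k : Int) from by ring]
      rw [show PySem.List.pyGetD (data.getD (k + 1) []) 1 0
            = rbVal data ((k : Int) + 1) from by
        rw [rbVal, show ((k : Int) + 1) = (((k + 1 : Nat) : Int)) from by push_cast; ring,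
          PySem.List.pyGetD_natCast]]
      exact if_congr (by simp [rbQb]) rfl rfl)]
  rw [PySem.List.foldl_append_if (rbQb data) (fun k => (k : Int) + 1)
    (List.range (data.length - 2)) []]
  rw [List.nil_append]
  -- the deletion loop
  have hrev : (((List.range (data.length - 2)).filter (rbQb data)).map
      (fun k : Nat => ((k : Int) + 1))).reverse
      = (((List.range (data.length - 2)).filter (rbQb data)).reverse).map
        (fun k : Nat => ((k : Int) + 1)) := List.map_reverse.symm
  rw [hrev, List.foldl_map]
  rw [PySem.List.foldl_congr_mem _ _ (fun d k => rbDelNat d (k + 1)) data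
    (by intro d k _; exact rb_del_eq d k)]
  have hpw : ((((List.range (data.length - 2)).filter (rbQb data)).reverse).map
      (fun k => k + 1)).Pairwise (· > ·) := by
    rw [List.pairwise_map, List.pairwise_reverse]
    have := (List.pairwise_lt_range (n := data.length - 2)).filter (rbQb data)
    exact this.imp (by intro a b hab; omega)
  have hbound : ∀ r ∈ (((List.range (data.length - 2)).filter (rbQb data)).reverse).map
      (fun k => k + 1), r < data.length := by
    intro r hr
    obtain ⟨k, hk, rfl⟩ := List.mem_map.mp hr
    have := List.mem_range.mp (List.mem_of_mem_filter (List.mem_reverse.mp hk))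
    omega
  have hfinal := rb_foldl_del _ data hpw hbound
  rw [List.foldl_map] at hfinal
  rw [hfinal]
  -- now reduce the complement-filter form to rbKeep
  set l := (List.range (data.length - 2)).filter (rbQb data) with hl
  have hcontains : ∀ i : Nat, ((l.reverse.map (fun k => k + 1)).contains i) = true ↔
      ∃ k ∈ l, i = k + 1 := by
    intro i
    rw [List.contains_iff_mem]
    constructor
    · intro hi
      obtain ⟨k, hk, rfl⟩ := List.mem_map.mp hi
      exact ⟨k, List.mem_reverse.mp hk, rfl⟩
    · rintro ⟨k, hk, rfl⟩
      exact List.mem_map.mpr ⟨k, List.mem_reverse.mpr hk, rfl⟩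
  rw [show data.length = (data.length - 1) + 1 from by omega, List.range_succ,
    show data.length - 1 = (data.length - 2) + 1 from by omega, List.range_succ_eq_map]
  rw [List.filter_append, List.filter_cons, List.filter_map]
  have h0 : (!(l.reverse.map (fun k => k + 1)).contains 0) = true := by
    simp only [Bool.not_eq_true', Bool.eq_false_iff, ne_eq]
    intro hc
    obtain ⟨k, _, hk⟩ := (hcontains 0).mp hc
    omega
  have hlast : (!(l.reverse.map (fun k => k + 1)).contains ((data.length - 2) + 1)) = true := by
    simp only [Bool.not_eq_true', Bool.eq_false_iff, ne_eq]
    intro hc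
    obtain ⟨k, hk, hk2⟩ := (hcontains _).mp hc
    have := List.mem_range.mp (List.mem_of_mem_filter hk)
    omega
  have hmid : List.filter ((fun i => !(l.reverse.map (fun k => k + 1)).contains i) ∘ Nat.succ)
      (List.range (data.length - 2))
      = (List.range (data.length - 2)).filter (fun k => !rbQb data k) := by
    apply List.filter_congr
    intro k hk
    simp only [Function.comp]
    have hck : ((l.reverse.map (fun k => k + 1)).contains (k + 1)) = rbQb data k := by
      by_cases hq : rbQb data k = true
      · rw [hq]
        exact (hcontains (k + 1)).mpr ⟨k, List.mem_filter.mpr ⟨hk, hq⟩, rfl⟩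
      · have hq' : rbQb data k = false := by
          revert hq; cases rbQb data k <;> simp
        rw [hq']
        rw [Bool.eq_false_iff]
        intro hc
        obtain ⟨k', hk', he⟩ := (hcontains _).mp hc
        have hkk : k' = k := by omega
        subst hkk
        exact hq (List.mem_filter.mp hk').2
    rw [Nat.succ_eq_add_one, hck]
  rw [List.filter_cons, if_pos h0, hmid, if_pos hlast, List.filter_nil]
  rw [List.map_append, List.map_cons, List.map_map, rbKeep]
  simp only [List.map_cons, List.map_nil]
  rw [show data.length - 2 + 1 = data.length - 1 from by omega]
  rfl

-- ===== VERDICT (by name: the statement is the Claim_ definition above) =====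
theorem reduce_burndown_data_spec : Claim_equal_reduce_burndown_data := by
  intro data _ _
  unfold Spec_reduce_burndown_data
  by_cases hlen : data.length < 30
  · unfold reduce_burndown_data reduce_burndown_data_alt
    rw [if_pos hlen, if_pos hlen]
  · rw [rb_a_eq data (by omega), rb_alt_eq data (by omega)]
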